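-- pv_equiv track=rewrite | github.com/norhh/Rete | rete-feature-extracter/learning/prophet.py | prune_children
-- ===== SOURCE A (Python) =====
-- from typing import List
--
-- def covers(n1, n2):
--     if n1[0][0] != n2[0][0]:
--         return False
--     if n1[0][1] <= n2[0][1] and n1[0][3] >= n2[0][3]:
--         return True
--     return False
--
-- def prune_children(nodes: List):
--     eliminate = {}
--     for i in range(len(nodes)):
--         if eliminate.get(i, False) is True:
--             continue
--         for j in range(i + 1, len(nodes)):
--             if covers(nodes[i], nodes[j]):
--                 eliminate[j] = True
--         eliminate[i] = False
--     new_nodes = []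
--     for i in range(len(nodes)):
--         if not eliminate[i]:
--             new_nodes.append(nodes[i])
--     return new_nodes
-- ===== SOURCE B (Python) =====
-- def covers(n1, n2):
--     if n1[0][0] != n2[0][0]:
--         return False
--     if n1[0][1] <= n2[0][1] and n1[0][3] >= n2[0][3]:
--         return True
--     return False
--
--
-- def prune_children(nodes):
--     # Single pass: a node survives iff no already-surviving earlier node covers it.
--     kept = []
--     for node in nodes:
--         if not any(covers(k, node) for k in kept):
--             kept.append(node)
--     return kept
-- ===== Notes on version B (the rewrite author's own statement) =====
-- stated objective: simpler
-- what changed: Replaces A's two-phase index/dict bookkeeping (forward-marking every later covered index, then filtering by the dict) with a single pass that appends a node only if no already-kept node covers it, relying on the fact that only surviving nodes can eliminate.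
import Mathlib
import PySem

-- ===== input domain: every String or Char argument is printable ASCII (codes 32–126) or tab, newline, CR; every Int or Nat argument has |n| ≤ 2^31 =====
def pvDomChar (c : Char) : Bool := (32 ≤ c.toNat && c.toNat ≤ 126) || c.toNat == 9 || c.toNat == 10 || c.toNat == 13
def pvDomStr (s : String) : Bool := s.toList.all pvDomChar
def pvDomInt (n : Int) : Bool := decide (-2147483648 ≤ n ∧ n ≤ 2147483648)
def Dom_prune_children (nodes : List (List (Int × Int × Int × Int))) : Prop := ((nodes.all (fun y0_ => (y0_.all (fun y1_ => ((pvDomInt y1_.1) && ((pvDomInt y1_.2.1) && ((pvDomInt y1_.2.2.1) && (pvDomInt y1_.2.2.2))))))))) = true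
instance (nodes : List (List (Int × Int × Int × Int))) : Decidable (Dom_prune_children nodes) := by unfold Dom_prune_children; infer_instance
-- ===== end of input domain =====

-- B replaces A's two-phase dict bookkeeping by one pass that keeps a node iff no
-- already-kept node covers it (objective: simpler; same asymptotic cost).

-- ===== PORT A =====
-- helper shared by both sources (Source B defines the identical 'covers');
-- the '| _, _ => false' arm is where Python raises IndexError on an empty node (excluded by Pre_)
def covers (n1 n2 : List (Int × Int × Int × Int)) : Bool :=
  match PySem.List.pyGet? n1 0, PySem.List.pyGet? n2 0 with
  | some a, some b =>
      if a.1 ≠ b.1 then false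
      else if a.2.1 ≤ b.2.1 ∧ a.2.2.2 ≥ b.2.2.2 then true
      else false
  | _, _ => false

def prune_children (nodes : List (List (Int × Int × Int × Int))) : List (List (Int × Int × Int × Int)) :=
  let n : Int := (nodes.length : Int)
  let eliminate : PySem.Dict Int Bool :=
    (PySem.List.pyRange 0 n 1).foldl (fun e i =>
      if e.getD i false = true then e
      else
        let e' := (PySem.List.pyRange (i + 1) n 1).foldl (fun e2 j =>
          if covers (PySem.List.pyGetD nodes i []) (PySem.List.pyGetD nodes j [])
          then e2.insert j true else e2) e
        e'.insert i false) PySem.Dict.empty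
  -- 'eliminate[i]': the key i is always present at this point, so getD is exact
  (PySem.List.pyRange 0 n 1).foldl (fun acc i =>
    if !(eliminate.getD i false) then acc ++ [PySem.List.pyGetD nodes i []] else acc) []

-- ===== PORT B =====
def prune_children_alt (nodes : List (List (Int × Int × Int × Int))) : List (List (Int × Int × Int × Int)) :=
  nodes.foldl (fun kept node =>
    if kept.any (fun k => covers k node) then kept else kept ++ [node]) []

-- ===== PRECONDITION & SPEC =====
-- Pre_ excludes exactly the inputs where Python A raises IndexError: an empty inner
-- node together with at least one other node makes 'covers' evaluate n[0] of an empty list.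
def Pre_prune_children (nodes : List (List (Int × Int × Int × Int))) : Prop :=
  nodes.length ≤ 1 ∨ ∀ nd ∈ nodes, nd ≠ []
instance (nodes : List (List (Int × Int × Int × Int))) : Decidable (Pre_prune_children nodes) := by
  unfold Pre_prune_children; infer_instance

def pvWitness_prune_children : (List (List (Int × Int × Int × Int))) :=
  [[(1, 0, 0, 10)], [(1, 2, 0, 5)], [(2, 0, 0, 3)]]

def Spec_prune_children (nodes : List (List (Int × Int × Int × Int))) (out : List (List (Int × Int × Int × Int))) : Prop := out = prune_children_alt nodes
instance (nodes : List (List (Int × Int × Int × Int))) (out : List (List (Int × Int × Int × Int))) : Decidable (Spec_prune_children nodes out) := by unfold Spec_prune_children; infer_instance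

-- ===== CLAIM (what is proved, stated in full; the proofs are below) =====
def Claim_equal_prune_children : Prop := ∀ (nodes : List (List (Int × Int × Int × Int))), Dom_prune_children nodes → Pre_prune_children nodes → Spec_prune_children nodes (prune_children nodes)

-- ===== LEMMAS AND PROOFS =====

-- 'nd nodes k' = nodes[k] (default [] never reached for k < length)
def pvNd (nodes : List (List (Int × Int × Int × Int))) (k : Nat) : List (Int × Int × Int × Int) :=
  nodes.getD k []

-- B's kept list after the first i nodes
def pvK (nodes : List (List (Int × Int × Int × Int))) (i : Nat) : List (List (Int × Int × Int × Int)) :=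
  (nodes.take i).foldl (fun kept node =>
    if kept.any (fun k => covers k node) then kept else kept ++ [node]) []

-- does node i survive?
def pvSurv (nodes : List (List (Int × Int × Int × Int))) (i : Nat) : Bool :=
  !(pvK nodes i).any (fun k => covers k (pvNd nodes i))

theorem pvK_succ (nodes : List (List (Int × Int × Int × Int))) (i : Nat) (h : i < nodes.length) :
    pvK nodes (i + 1) = if pvSurv nodes i then pvK nodes i ++ [pvNd nodes i] else pvK nodes i := by
  unfold pvSurv pvK
  rw [List.take_add_one, List.foldl_append]
  have : nodes[i]? = some (pvNd nodes i) := by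
    simp [pvNd, List.getD, List.getElem?_eq_getElem h]
  rw [this]
  simp only [Option.toList_some, List.foldl_cons, List.foldl_nil]
  by_cases hc : ((nodes.take i).foldl (fun kept node =>
      if kept.any (fun k => covers k node) then kept else kept ++ [node]) []).any
      (fun k => covers k (pvNd nodes i)) = true
  · rw [if_pos hc, hc, Bool.not_true, if_neg (by decide : ¬(false = true))]
  · rw [if_neg hc, Bool.not_eq_true] at *
    rw [hc, Bool.not_false, if_pos rfl]

theorem pvK_eq (nodes : List (List (Int × Int × Int × Int))) :
    ∀ i, i ≤ nodes.length →
      pvK nodes i = ((List.range i).filter (fun m => pvSurv nodes m)).map (pvNd nodes) := by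
  intro i
  induction i with
  | zero => intro _; simp [pvK]
  | succ i ih =>
    intro h
    rw [pvK_succ nodes i (by omega), ih (by omega), List.range_succ, List.filter_append,
        List.map_append]
    by_cases hs : pvSurv nodes i = true
    · simp [hs]
    · simp [hs]

theorem pvK_any (nodes : List (List (Int × Int × Int × Int))) (i : Nat) (h : i ≤ nodes.length)
    (p : List (Int × Int × Int × Int) → Bool) :
    (pvK nodes i).any p = true ↔ ∃ m, m < i ∧ pvSurv nodes m = true ∧ p (pvNd nodes m) = true := by
  rw [pvK_eq nodes i h]
  simp only [List.any_eq_true, List.mem_map, List.mem_filter, List.mem_range]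
  constructor
  · rintro ⟨x, ⟨m, ⟨hm, hs⟩, rfl⟩, hp⟩; exact ⟨m, hm, hs, hp⟩
  · rintro ⟨m, hm, hs, hp⟩; exact ⟨pvNd nodes m, ⟨m, ⟨hm, hs⟩, rfl⟩, hp⟩

theorem pvSurv_iff (nodes : List (List (Int × Int × Int × Int))) (i : Nat) (h : i ≤ nodes.length) :
    pvSurv nodes i = true ↔
      ¬ ∃ m, m < i ∧ pvSurv nodes m = true ∧ covers (pvNd nodes m) (pvNd nodes i) = true := by
  have h1 : pvSurv nodes i = true ↔
      ¬ (pvK nodes i).any (fun k => covers k (pvNd nodes i)) = true := by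
    unfold pvSurv; simp
  rw [h1, pvK_any nodes i h]

-- covers with an empty second argument is always false
theorem covers_nil (x : List (Int × Int × Int × Int)) : covers x [] = false := by
  unfold covers
  cases PySem.List.pyGet? x 0 <;> simp [PySem.List.pyGet?]

-- the inner marking loop, over an arbitrary list of Nat indices
theorem pvMark_getD (c : Nat → Bool) (js : List Nat) :
    ∀ (e : PySem.Dict Int Bool) (t : Nat),
      (js.foldl (fun e2 j => if c j then e2.insert (j : Int) true else e2) e).getD (t : Int) false = true
        ↔ (t ∈ js ∧ c t = true) ∨ e.getD (t : Int) false = true := by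
  induction js with
  | nil => intro e t; simp
  | cons j js ih =>
    intro e t
    simp only [List.foldl_cons]
    by_cases hj : c j = true
    · rw [if_pos hj, ih]
      rw [PySem.Dict.getD_insert]
      by_cases ht : t = j
      · subst ht; simp [hj]
      · have : (t : Int) ≠ (j : Int) := by exact_mod_cast ht
        simp [this, List.mem_cons, ht]
    · rw [if_neg hj, ih]
      have ht : ¬(t = j ∧ c t = true) := by rintro ⟨rfl, hc⟩; exact hj hc
      simp only [List.mem_cons]
      constructor
      · rintro (⟨hm, hc⟩ | hg)
        · exact Or.inl ⟨Or.inr hm, hc⟩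
        · exact Or.inr hg
      · rintro (⟨hm | hm, hc⟩ | hg)
        · exact absurd ⟨hm, hc⟩ ht
        · exact Or.inl ⟨hm, hc⟩
        · exact Or.inr hg

-- A's elimination dict after processing the first i indices, in Nat form
def pvE (nodes : List (List (Int × Int × Int × Int))) (i : Nat) : PySem.Dict Int Bool :=
  (List.range i).foldl (fun e (k : Nat) =>
    if e.getD (k : Int) false = true then e
    else
      (((List.range (nodes.length - (k + 1))).map (fun m => k + 1 + m)).foldl (fun e2 j =>
        if covers (pvNd nodes k) (pvNd nodes j) then e2.insert (j : Int) true else e2) e).insert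
        (k : Int) false) PySem.Dict.empty

theorem pvE_char (nodes : List (List (Int × Int × Int × Int))) :
    ∀ i, i ≤ nodes.length → ∀ t : Nat,
      (pvE nodes i).getD (t : Int) false = true ↔
        ∃ m, m < i ∧ m < t ∧ pvSurv nodes m = true ∧ covers (pvNd nodes m) (pvNd nodes t) = true := by
  intro i
  induction i with
  | zero =>
    intro _ t
    simp [pvE, PySem.Dict.getD, PySem.Dict.get?, PySem.Dict.empty]
  | succ i ih =>
    intro h t
    have hi : i ≤ nodes.length := by omega
    have hE : pvE nodes (i + 1) =
        if (pvE nodes i).getD (i : Int) false = true then pvE nodes i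
        else
          (((List.range (nodes.length - (i + 1))).map (fun m => i + 1 + m)).foldl (fun e2 j =>
            if covers (pvNd nodes i) (pvNd nodes j) then e2.insert (j : Int) true else e2)
            (pvE nodes i)).insert (i : Int) false := by
      unfold pvE
      rw [List.range_succ, List.foldl_append, List.foldl_cons, List.foldl_nil]
    have hSi : (pvE nodes i).getD (i : Int) false = true ↔ pvSurv nodes i = false := by
      rw [ih hi i, ← Bool.not_eq_true, pvSurv_iff nodes i hi, not_not]
      constructor
      · rintro ⟨m, hm, _, hs, hc⟩; exact ⟨m, hm, hs, hc⟩
      · rintro ⟨m, hm, hs, hc⟩; exact ⟨m, hm, hm, hs, hc⟩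
    rw [hE]
    by_cases hskip : (pvE nodes i).getD (i : Int) false = true
    · rw [if_pos hskip, ih hi t]
      have hsurvF : pvSurv nodes i = false := hSi.mp hskip
      constructor
      · rintro ⟨m, hm, hmt, hs, hc⟩; exact ⟨m, by omega, hmt, hs, hc⟩
      · rintro ⟨m, hm, hmt, hs, hc⟩
        refine ⟨m, ?_, hmt, hs, hc⟩
        rcases Nat.lt_succ_iff_lt_or_eq.mp hm with h' | rfl
        · exact h'
        · rw [hsurvF] at hs; cases hs
    · rw [if_neg hskip]
      have hsurvT : pvSurv nodes i = true := by
        rcases Bool.eq_false_or_eq_true (pvSurv nodes i) with h' | h'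
        · exact h'
        · rw [← hSi] at h'; exact absurd h' hskip
      rw [PySem.Dict.getD_insert]
      by_cases hti : (t : Int) = (i : Int)
      · have hti' : t = i := by exact_mod_cast hti
        rw [if_pos hti]
        simp only [Bool.false_eq_true, false_iff]
        rintro ⟨m, hm, hmt, hs, hc⟩
        rw [hti'] at hc
        exact (pvSurv_iff nodes i hi).mp hsurvT ⟨m, by omega, hs, hc⟩
      · rw [if_neg hti]
        have hti' : t ≠ i := by intro h'; exact hti (by exact_mod_cast h')
        rw [pvMark_getD (fun j => covers (pvNd nodes i) (pvNd nodes j))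
              ((List.range (nodes.length - (i + 1))).map (fun m => i + 1 + m)) (pvE nodes i) t,
            ih hi t]
        constructor
        · rintro (⟨hmem, hc⟩ | ⟨m, hm, hmt, hs, hc⟩)
          · simp only [List.mem_map, List.mem_range] at hmem
            obtain ⟨m, hm, rfl⟩ := hmem
            exact ⟨i, by omega, by omega, hsurvT, hc⟩
          · exact ⟨m, by omega, hmt, hs, hc⟩
        · rintro ⟨m, hm, hmt, hs, hc⟩
          rcases Nat.lt_succ_iff_lt_or_eq.mp hm with h' | rfl
          · exact Or.inr ⟨m, h', hmt, hs, hc⟩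
          · left
            refine ⟨?_, hc⟩
            simp only [List.mem_map, List.mem_range]
            by_cases htN : t < nodes.length
            · exact ⟨t - (m + 1), by omega, by omega⟩
            · exfalso
              have : pvNd nodes t = [] := by
                simp [pvNd, List.getD, List.getElem?_eq_none (by omega : nodes.length ≤ t)]
              rw [this, covers_nil] at hc
              cases hc

-- A's Int-indexed inner loop equals the Nat-indexed one used in pvE
theorem pvMark_map (nodes : List (List (Int × Int × Int × Int))) (k : Nat) (e : PySem.Dict Int Bool) :
    ((List.range (nodes.length - (k + 1))).map (fun m : Nat => ((k : Int) + 1) + (m : Int))).foldl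
        (fun e2 j => if covers (pvNd nodes k) (PySem.List.pyGetD nodes j []) then e2.insert j true else e2) e
      = ((List.range (nodes.length - (k + 1))).map (fun m => k + 1 + m)).foldl (fun e2 j =>
          if covers (pvNd nodes k) (pvNd nodes j) then e2.insert (j : Int) true else e2) e := by
  rw [List.foldl_map, List.foldl_map]
  apply PySem.List.foldl_congr_mem
  intro e2 m _
  have hcast : ((k : Int) + 1) + (m : Int) = ((k + 1 + m : Nat) : Int) := by push_cast; ring
  rw [hcast, PySem.List.pyGetD_natCast]
  rfl

-- A, rewritten with Nat-indexed folds
theorem prune_children_eq_nat (nodes : List (List (Int × Int × Int × Int))) :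
    prune_children nodes =
      (List.range nodes.length).foldl (fun acc (t : Nat) =>
        if !((pvE nodes nodes.length).getD (t : Int) false) then acc ++ [pvNd nodes t] else acc) [] := by
  unfold prune_children
  simp only [PySem.List.pyRange_zero_natCast, List.foldl_map]
  have helim : (List.range nodes.length).foldl (fun e (k : Nat) =>
      if e.getD (k : Int) false = true then e
      else
        ((PySem.List.pyRange ((k : Int) + 1) (nodes.length : Int) 1).foldl (fun e2 j =>
          if covers (PySem.List.pyGetD nodes (k : Int) []) (PySem.List.pyGetD nodes j [])
          then e2.insert j true else e2) e).insert (k : Int) false) PySem.Dict.empty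
      = pvE nodes nodes.length := by
    unfold pvE
    apply PySem.List.foldl_congr_mem
    intro e k hk
    rw [List.mem_range] at hk
    by_cases hs : e.getD (k : Int) false = true
    · rw [if_pos hs, if_pos hs]
    · rw [if_neg hs, if_neg hs]
      congr 1
      have hget : PySem.List.pyGetD nodes ((k : Nat) : Int) [] = pvNd nodes k := by
        rw [PySem.List.pyGetD_natCast]; rfl
      rw [hget]
      rw [PySem.List.pyRange_one]
      have harith : (((nodes.length : Int) - ((k : Int) + 1)).toNat) = nodes.length - (k + 1) := by
        omega
      rw [harith, pvMark_map nodes k e]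
  rw [helim]
  apply PySem.List.foldl_congr_mem
  intro acc t ht
  rw [List.mem_range] at ht
  have hget : PySem.List.pyGetD nodes ((t : Nat) : Int) [] = pvNd nodes t := by
    rw [PySem.List.pyGetD_natCast]; rfl
  rw [hget]

theorem pvE_final (nodes : List (List (Int × Int × Int × Int))) (t : Nat) (ht : t < nodes.length) :
    (!((pvE nodes nodes.length).getD (t : Int) false)) = pvSurv nodes t := by
  have hiff := pvE_char nodes nodes.length (le_refl _) t
  have hsi := pvSurv_iff nodes t (by omega)
  rcases Bool.eq_false_or_eq_true (pvSurv nodes t) with hs | hs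
  · have hg : (pvE nodes nodes.length).getD (t : Int) false = false := by
      rw [Bool.eq_false_iff]
      intro hcontra
      rw [hiff] at hcontra
      obtain ⟨m, _, hmt, hsm, hc⟩ := hcontra
      exact (hsi.mp hs) ⟨m, hmt, hsm, hc⟩
    rw [hg, hs]
    decide
  · have hg : (pvE nodes nodes.length).getD (t : Int) false = true := by
      have h2 : ∃ m, m < t ∧ pvSurv nodes m = true ∧ covers (pvNd nodes m) (pvNd nodes t) = true := by
        by_contra hno
        have hT := hsi.mpr hno
        rw [hs] at hT
        exact Bool.false_ne_true hT
      obtain ⟨m, hmt, hsm, hc⟩ := h2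
      rw [hiff]
      exact ⟨m, by omega, hmt, hsm, hc⟩
    rw [hg, hs]
    decide

-- ===== VERDICT (by name: the statement is the Claim_ definition above) =====
theorem prune_children_spec : Claim_equal_prune_children := by
  intro nodes _ _
  unfold Spec_prune_children
  rw [prune_children_eq_nat]
  have hstep : (List.range nodes.length).foldl (fun acc (t : Nat) =>
      if !((pvE nodes nodes.length).getD (t : Int) false) then acc ++ [pvNd nodes t] else acc) []
      = (List.range nodes.length).foldl (fun acc (t : Nat) =>
      if pvSurv nodes t then acc ++ [pvNd nodes t] else acc) [] := by
    apply PySem.List.foldl_congr_mem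
    intro acc t ht
    rw [List.mem_range] at ht
    rw [pvE_final nodes t ht]
  rw [hstep, PySem.List.foldl_append_if]
  have hK : prune_children_alt nodes = pvK nodes nodes.length := by
    unfold prune_children_alt pvK
    rw [List.take_length]
  rw [hK, pvK_eq nodes nodes.length (le_refl _)]
  simp
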